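-- pv_equiv track=rewrite | github.com/Georgycas/Data-Structure | HW#3/3.1.py | find_safe_nests
-- ===== SOURCE A (Python) =====
-- def find_safe_nests(n):
--     # Create a circular linked list of 10 nests
--     nests = [i + 1 for i in range(10)]
--     current_nest = 0
--
--     # Traverse the linked list and mark unsafe nests as None
--     skip = 1
--     for i in range(1, n + 1):
--         # Skip nests
--         for j in range(skip):
--             current_nest = (current_nest + 1) % len(nests)
--         skip += 1
--
--         # Mark nest as unsafe
--         nests[current_nest] = None
--
--     # Return list of safe nests
--     return [nest for nest in nests if nest is not None]
-- ===== SOURCE B (Python) =====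
-- def find_safe_nests(n):
--     # Closed form: the nest marked at step i is (i*(i+1)//2) % 10, periodic in i
--     # with period 20, so only the first min(n, 20) steps matter.
--     m = min(n, 20)
--     marked = {(i * (i + 1) // 2) % 10 for i in range(1, m + 1)}
--     return [j + 1 for j in range(10) if j not in marked]
-- ===== Notes on version B (the rewrite author's own statement) =====
-- stated objective: faster
-- what changed: Replaces the cumulative-skip simulation (an inner loop of i steps per iteration) by the closed form marked position = i(i+1)/2 mod 10, which is periodic with period 20, so only min(n,20) marks are computed.
import Mathlib
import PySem

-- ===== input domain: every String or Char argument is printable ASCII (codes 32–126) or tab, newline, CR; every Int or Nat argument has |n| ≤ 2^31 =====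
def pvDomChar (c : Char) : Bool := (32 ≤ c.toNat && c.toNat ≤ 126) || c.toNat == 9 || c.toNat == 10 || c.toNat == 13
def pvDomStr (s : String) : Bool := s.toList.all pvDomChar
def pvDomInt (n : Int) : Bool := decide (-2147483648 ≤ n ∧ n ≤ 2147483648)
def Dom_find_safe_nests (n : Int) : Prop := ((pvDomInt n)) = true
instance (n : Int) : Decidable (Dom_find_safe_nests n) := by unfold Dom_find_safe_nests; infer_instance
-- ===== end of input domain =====

-- B replaces A's cumulative-skip simulation by the closed form i(i+1)/2 mod 10 over
-- the first min(n,20) steps (the mark sequence is periodic with period 20).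

-- ===== PORT A =====
-- one outer-loop iteration of A: state = (nests, current_nest, skip)
def pvStepA (st : List (Option Int) × Int × Int) (_i : Int) :
    List (Option Int) × Int × Int :=
  let nests := st.1
  let cur := (PySem.List.pyRange 0 st.2.2 1).foldl
    (fun c _ => PySem.Int.mod (c + 1) (PySem.List.len nests)) st.2.1
  (PySem.List.pySetD nests cur none, cur, st.2.2 + 1)

def pvNests0 : List (Option Int) :=
  (PySem.List.pyRange 0 10 1).map (fun i => some (i + 1))

def find_safe_nests (n : Int) : List Int :=
  let st := (PySem.List.pyRange 1 (n + 1) 1).foldl pvStepA (pvNests0, 0, 1)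
  st.1.filterMap id

-- ===== PORT B =====
def find_safe_nests_alt (n : Int) : List Int :=
  let m := min n 20
  let marked : PySem.Set Int := PySem.Set.ofList
    ((PySem.List.pyRange 1 (m + 1) 1).map
      (fun i => PySem.Int.mod (PySem.Int.floordiv (i * (i + 1)) 2) 10))
  ((PySem.List.pyRange 0 10 1).filter (fun j => !(PySem.Set.contains marked j))).map
    (fun j => j + 1)

-- ===== PRECONDITION & SPEC =====
def Spec_find_safe_nests (n : Int) (out : List Int) : Prop := out = find_safe_nests_alt n
instance (n : Int) (out : List Int) : Decidable (Spec_find_safe_nests n out) := by unfold Spec_find_safe_nests; infer_instance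

-- ===== CLAIM (what is proved, stated in full; the proofs are below) =====
def Claim_equal_find_safe_nests : Prop := ∀ (n : Int), Dom_find_safe_nests n → Spec_find_safe_nests n (find_safe_nests n)

-- ===== LEMMAS AND PROOFS =====

-- the nests list after 20 (or more) iterations of A's loop
def pvN20 : List (Option Int) :=
  [none, none, some 3, none, some 5, none, none, some 8, none, some 10]

-- current_nest after m iterations of A's loop, as a function of m % 20
def pvT (r : Nat) : Int :=
  [0, 1, 3, 6, 0, 5, 1, 8, 6, 5, 5, 6, 8, 1, 5, 0, 6, 3, 1, 0].getD r 0

def pvStA (n : Int) : List (Option Int) × Int × Int :=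
  (PySem.List.pyRange 1 (n + 1) 1).foldl pvStepA (pvNests0, 0, 1)

lemma pv_find_eq (n : Int) : find_safe_nests n = (pvStA n).1.filterMap id := rfl

lemma pvStA_succ (m : Nat) :
    pvStA ((m : Int) + 1) = pvStepA (pvStA m) ((m : Int) + 1) := by
  unfold pvStA
  rw [show ((m : Int) + 1 + 1) = ((m : Int) + 1) + 1 by ring,
      PySem.List.pyRange_one_succ_right (by omega), List.foldl_append]
  simp

lemma pv_fold_incmod (l : List Int) (c : Int) (h0 : 0 ≤ c) (h10 : c < 10) :
    l.foldl (fun c _ => PySem.Int.mod (c + 1) 10) c = PySem.Int.mod (c + l.length) 10 := by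
  induction l generalizing c with
  | nil =>
    simp only [List.foldl_nil, List.length_nil]
    rw [PySem.Int.mod_eq_emod_of_pos (by norm_num)]
    omega
  | cons x t ih =>
    simp only [List.foldl_cons, List.length_cons]
    rw [ih _ (PySem.Int.mod_nonneg _ (by norm_num)) (PySem.Int.mod_lt _ (by norm_num)),
        PySem.Int.mod_eq_emod_of_pos (by norm_num),
        PySem.Int.mod_eq_emod_of_pos (by norm_num),
        PySem.Int.mod_eq_emod_of_pos (by norm_num)]
    push_cast
    omega

lemma pvT_bounds (r : Nat) : 0 ≤ pvT r ∧ pvT r < 10 := by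
  unfold pvT
  by_cases h : r < 20
  · interval_cases r <;> decide
  · rw [List.getD_eq_default _ _ (by simp; omega)]; norm_num

lemma pvT_step (m : Nat) :
    PySem.Int.mod (pvT (m % 20) + ((m : Int) + 1)) 10 = pvT ((m + 1) % 20) := by
  rw [PySem.Int.mod_eq_emod_of_pos (by norm_num)]
  have h : m % 20 < 20 := Nat.mod_lt _ (by norm_num)
  interval_cases hr : m % 20 <;>
    · have h1 : (m + 1) % 20 = (m % 20 + 1) % 20 := by omega
      rw [h1, hr]
      norm_num [pvT, List.getD]
      omega

lemma pvN20_set (r : Nat) (h : r < 20) :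
    PySem.List.pySetD pvN20 (pvT r) none = pvN20 := by
  interval_cases r <;> decide

set_option maxRecDepth 20000 in
lemma pv_inv (m : Nat) (h : 20 ≤ m) :
    pvStA m = (pvN20, pvT (m % 20), (m : Int) + 1) := by
  induction m, h using Nat.le_induction with
  | base => decide
  | succ m hm ih =>
    have hstep := pvStA_succ m
    rw [ih] at hstep
    rw [show (((m + 1 : Nat) : Int)) = (m : Int) + 1 by push_cast; ring, hstep]
    unfold pvStepA
    simp only
    have hlen : PySem.List.len pvN20 = 10 := by decide
    rw [hlen, pv_fold_incmod _ _ (pvT_bounds _).1 (pvT_bounds _).2,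
        PySem.List.length_pyRange_one]
    rw [show ((((m : Int) + 1 - 0).toNat : Nat) : Int) = (m : Int) + 1 by omega]
    rw [pvT_step m, pvN20_set _ (Nat.mod_lt _ (by norm_num))]

-- ===== VERDICT (by name: the statement is the Claim_ definition above) =====
set_option maxRecDepth 40000 in
theorem find_safe_nests_spec : Claim_equal_find_safe_nests := by
  intro n _
  unfold Spec_find_safe_nests
  by_cases hneg : n < 0
  · have h1 : PySem.List.pyRange 1 (n + 1) 1 = [] :=
      PySem.List.pyRange_one_eq_nil (by omega)
    have h2 : min n 20 = n := min_eq_left (by omega)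
    simp only [find_safe_nests, find_safe_nests_alt, h2, h1]
    decide
  · by_cases hbig : 20 < n
    · have hA : find_safe_nests n = [3, 5, 8, 10] := by
        rw [pv_find_eq, show n = ((n.toNat : Nat) : Int) by omega,
            pv_inv n.toNat (by omega)]
        show pvN20.filterMap id = _
        decide
      have h2 : min n 20 = 20 := min_eq_right (by omega)
      rw [hA]
      simp only [find_safe_nests_alt, h2]
      decide
    · have h0 : 0 ≤ n := by omega
      have h20 : n ≤ 20 := by omega
      interval_cases n <;> decide
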